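-- pv_equiv track=rewrite | github.com/ASTRO-47/facebook-scraper | scraper/posts_improved.py | _clean_repetitive_text
-- ===== SOURCE A (Python) =====
-- def _clean_repetitive_text(text: str) -> str:
--     """Clean text with excessive repetition"""
--     if not text:
--         return ""
--
--     words = text.split()
--     if len(words) < 10:
--         return text
--
--     # Remove excessive repetition of the word "Facebook"
--     if words.count("Facebook") > 10:
--         # Keep first few and last few occurrences
--         cleaned_words = []
--         facebook_count = 0
--         for word in words:
--             if word == "Facebook":
--                 facebook_count += 1
--                 if facebook_count <= 3:  # Keep first 3
--                     cleaned_words.append(word)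
--             else:
--                 cleaned_words.append(word)
--         text = ' '.join(cleaned_words)
--
--     return text
-- ===== SOURCE B (Python) =====
-- def _third_facebook_index(words):
--     """Index of the 3rd 'Facebook' in words, or len(words) if fewer than 3."""
--     remaining = 3
--     for i, w in enumerate(words):
--         if w == "Facebook":
--             remaining -= 1
--             if remaining == 0:
--                 return i
--     return len(words)
--
--
-- def _clean_repetitive_text(text: str) -> str:
--     """Clean text with excessive repetition"""
--     if not text:
--         return ""
--
--     words = text.split()
--     if len(words) < 10:
--         return text
--
--     if words.count("Facebook") <= 10:
--         return text
--
--     # Keep everything up to and including the 3rd "Facebook",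
--     # then drop every further "Facebook" from the tail.
--     idx = _third_facebook_index(words)
--     return ' '.join(words[:idx + 1] + [w for w in words[idx + 1:] if w != "Facebook"])
-- ===== Notes on version B (the rewrite author's own statement) =====
-- stated objective: alternative
-- what changed: Instead of A's single stateful counting pass over all words, B first locates the index of the 3rd 'Facebook' occurrence and then builds the result as the prefix up to that index plus the tail with all 'Facebook' tokens filtered out.
import Mathlib
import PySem

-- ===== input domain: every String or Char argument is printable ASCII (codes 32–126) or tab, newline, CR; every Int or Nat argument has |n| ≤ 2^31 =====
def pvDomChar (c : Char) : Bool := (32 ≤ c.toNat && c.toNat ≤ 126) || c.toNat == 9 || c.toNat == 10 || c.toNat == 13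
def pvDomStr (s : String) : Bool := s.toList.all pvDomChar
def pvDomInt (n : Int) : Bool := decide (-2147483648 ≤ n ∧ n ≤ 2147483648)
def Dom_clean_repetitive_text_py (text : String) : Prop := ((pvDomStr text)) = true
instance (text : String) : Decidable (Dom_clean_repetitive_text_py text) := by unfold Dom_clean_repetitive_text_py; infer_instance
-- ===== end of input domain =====

-- B changes the decomposition: find the 3rd 'Facebook' index first, then prefix ++ filtered tail (alternative, same cost).

-- ===== PORT A =====
def clean_repetitive_text_py (text : String) : String :=
  if text == "" then ""
  else
    let words := PySem.Str.split₀ text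
    if words.length < 10 then text
    else if PySem.List.count words "Facebook" > 10 then
      let st := words.foldl (fun (st : Int × List String) word =>
        if word == "Facebook" then
          let fb := st.1 + 1
          if fb ≤ 3 then (fb, st.2 ++ [word]) else (fb, st.2)
        else (st.1, st.2 ++ [word])) (0, [])
      PySem.Str.join " " st.2
    else text

-- ===== PORT B =====
-- port of Source B's _third_facebook_index (countdown loop with an index accumulator)
def pvThirdFbGo : List String → Int → Nat → Nat
  | [], _, i => i
  | w :: ws, remaining, i =>
      if w == "Facebook" then
        if remaining - 1 == 0 then i else pvThirdFbGo ws (remaining - 1) (i + 1)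
      else pvThirdFbGo ws remaining (i + 1)

def clean_repetitive_text_py_alt (text : String) : String :=
  if text == "" then ""
  else
    let words := PySem.Str.split₀ text
    if words.length < 10 then text
    else if PySem.List.count words "Facebook" ≤ 10 then text
    else
      let idx := pvThirdFbGo words 3 0
      PySem.Str.join " "
        (List.take (idx + 1) words ++ (List.drop (idx + 1) words).filter (fun w => w != "Facebook"))

-- ===== PRECONDITION & SPEC =====
def Spec_clean_repetitive_text_py (text : String) (out : String) : Prop := out = clean_repetitive_text_py_alt text
instance (text : String) (out : String) : Decidable (Spec_clean_repetitive_text_py text out) := by unfold Spec_clean_repetitive_text_py; infer_instance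

-- ===== CLAIM (what is proved, stated in full; the proofs are below) =====
def Claim_equal_clean_repetitive_text_py : Prop := ∀ (text : String), Dom_clean_repetitive_text_py text → Spec_clean_repetitive_text_py text (clean_repetitive_text_py text)

-- ===== LEMMAS AND PROOFS =====

-- functional form of A's foldl (word list kept, threading the Facebook count)
def pvF : List String → Int → List String
  | [], _ => []
  | w :: ws, fb =>
      if w == "Facebook" then
        if fb + 1 ≤ 3 then w :: pvF ws (fb + 1) else pvF ws (fb + 1)
      else w :: pvF ws fb

theorem pvF_foldl (ws : List String) (fb : Int) (acc : List String) :
    (ws.foldl (fun (st : Int × List String) word =>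
        if word == "Facebook" then
          let f := st.1 + 1
          if f ≤ 3 then (f, st.2 ++ [word]) else (f, st.2)
        else (st.1, st.2 ++ [word])) (fb, acc)).2 = acc ++ pvF ws fb := by
  induction ws generalizing fb acc with
  | nil => simp [pvF]
  | cons w ws ih =>
      simp at ih
      by_cases hw : w = "Facebook"
      · by_cases h3 : fb + 1 ≤ 3
        · have h3' : fb < 3 := by omega
          simp [pvF, hw, h3, h3', ih]
        · have h3' : ¬ fb < 3 := by omega
          simp [pvF, hw, h3, h3', ih]
      · simp [pvF, hw, ih]

theorem pvF_sat (ws : List String) (fb : Int) (h : 3 ≤ fb) :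
    pvF ws fb = ws.filter (fun w => w != "Facebook") := by
  induction ws generalizing fb with
  | nil => simp [pvF]
  | cons w ws ih =>
      by_cases hw : w = "Facebook"
      · have h3 : ¬ fb + 1 ≤ 3 := by omega
        simp [pvF, hw, h3, ih _ (by omega : (3:Int) ≤ fb + 1)]
      · simp [pvF, hw, ih _ h]

theorem pvThirdFbGo_shift (ws : List String) (r : Int) (i : Nat) :
    pvThirdFbGo ws r i = i + pvThirdFbGo ws r 0 := by
  induction ws generalizing r i with
  | nil => simp [pvThirdFbGo]
  | cons w ws ih =>
      simp only [pvThirdFbGo]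
      by_cases hw : w == "Facebook" <;> by_cases hr : r - 1 == 0 <;>
        simp [hw, hr, ih _ (i + 1), ih _ 1] <;> omega

theorem pvF_take_drop (ws : List String) (r : Int) (hr : 1 ≤ r) :
    pvF ws (3 - r) =
      List.take (pvThirdFbGo ws r 0 + 1) ws ++
        (List.drop (pvThirdFbGo ws r 0 + 1) ws).filter (fun w => w != "Facebook") := by
  induction ws generalizing r with
  | nil => simp [pvF, pvThirdFbGo]
  | cons w ws ih =>
      by_cases hw : w = "Facebook"
      · by_cases h1 : r - 1 = 0
        · have hr1 : r = 1 := by omega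
          subst hr1
          have e1 : pvF (w :: ws) (3 - 1) = w :: pvF ws 3 := by
            norm_num [pvF, hw]
          have e2 : pvThirdFbGo (w :: ws) 1 0 = 0 := by
            simp [pvThirdFbGo, hw]
          rw [e1, e2, pvF_sat ws 3 le_rfl]
          simp
        · have hr2 : 2 ≤ r := by omega
          have hkeep : (3 - r) + 1 ≤ 3 := by omega
          have e1 : pvF (w :: ws) (3 - r) = w :: pvF ws (3 - r + 1) := by
            simp [pvF, hw, hkeep]
          have e2 : pvThirdFbGo (w :: ws) r 0 = 1 + pvThirdFbGo ws (r - 1) 0 := by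
            simp [pvThirdFbGo, hw, h1, pvThirdFbGo_shift ws (r - 1) 1]
          have e3 : (3:Int) - r + 1 = 3 - (r - 1) := by ring
          rw [e1, e2, e3, ih (r - 1) (by omega),
            show 1 + pvThirdFbGo ws (r - 1) 0 + 1 = (pvThirdFbGo ws (r - 1) 0 + 1) + 1 by omega]
          simp [List.take_succ_cons, List.drop_succ_cons]
      · have e1 : pvF (w :: ws) (3 - r) = w :: pvF ws (3 - r) := by
          simp [pvF, hw]
        have e2 : pvThirdFbGo (w :: ws) r 0 = 1 + pvThirdFbGo ws r 0 := by
          simp [pvThirdFbGo, hw, pvThirdFbGo_shift ws r 1]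
        rw [e1, e2, ih r hr,
          show 1 + pvThirdFbGo ws r 0 + 1 = (pvThirdFbGo ws r 0 + 1) + 1 by omega]
        simp [List.take_succ_cons, List.drop_succ_cons]

-- ===== VERDICT (by name: the statement is the Claim_ definition above) =====
theorem clean_repetitive_text_py_spec : Claim_equal_clean_repetitive_text_py := by
  intro text _
  unfold Spec_clean_repetitive_text_py clean_repetitive_text_py clean_repetitive_text_py_alt
  by_cases h0 : text == ""
  · simp [h0]
  · simp only [h0, Bool.false_eq_true, if_false]
    by_cases hlen : (PySem.Str.split₀ text).length < 10
    · simp [hlen]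
    · simp only [hlen, if_false]
      by_cases hcnt : PySem.List.count (PySem.Str.split₀ text) "Facebook" > 10
      · rw [if_pos hcnt, if_neg (by omega)]
        simp only [pvF_foldl (PySem.Str.split₀ text) 0 [], List.nil_append]
        have h3 := pvF_take_drop (PySem.Str.split₀ text) 3 (by norm_num)
        norm_num at h3
        rw [h3]
      · rw [if_neg hcnt, if_pos (by omega)]
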